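-- pv_equiv track=rewrite | github.com/roychen97/detect_and_track | simple_ssd_demo.py | layer_params
-- ===== SOURCE A (Python) =====
-- def layer_params(layers_shapes, anchor_scales, anchor_ratios, extra_anchor_scales):
--     feature_num = []
--     feature_depth = []
--     anchor_num = 0
--     for id, layer in enumerate(layers_shapes):
--         feature_num.append(layer[0] * layer[1])
--         feature_depth.append(len(anchor_scales[id]) *len(anchor_ratios[id])  + len(extra_anchor_scales[id]))
--         anchor_num += (layer[0] * layer[1])* feature_depth[-1]
--
--     return anchor_num, feature_num, feature_depth
-- ===== SOURCE B (Python) =====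
-- def layer_params(layers_shapes, anchor_scales, anchor_ratios, extra_anchor_scales):
--     # Structural recursion: peel off the first layer, recurse on the tails,
--     # and cons the per-layer results onto the recursive answer (no indices,
--     # no mutable accumulators, lists built back-to-front).
--     if not layers_shapes:
--         return 0, [], []
--     (h, w) = layers_shapes[0]
--     fd = len(anchor_scales[0]) * len(anchor_ratios[0]) + len(extra_anchor_scales[0])
--     an, fns, fds = layer_params(layers_shapes[1:], anchor_scales[1:],
--                                 anchor_ratios[1:], extra_anchor_scales[1:])
--     fn = h * w
--     return fn * fd + an, [fn] + fns, [fd] + fds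
-- ===== Notes on version B (the rewrite author's own statement) =====
-- stated objective: alternative
-- what changed: Replaces A's indexed loop with mutable accumulators by a structural recursion that consumes the heads of all four lists in parallel and conses the per-layer results onto the recursive answer (index-free, lists built back-to-front).
import Mathlib
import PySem

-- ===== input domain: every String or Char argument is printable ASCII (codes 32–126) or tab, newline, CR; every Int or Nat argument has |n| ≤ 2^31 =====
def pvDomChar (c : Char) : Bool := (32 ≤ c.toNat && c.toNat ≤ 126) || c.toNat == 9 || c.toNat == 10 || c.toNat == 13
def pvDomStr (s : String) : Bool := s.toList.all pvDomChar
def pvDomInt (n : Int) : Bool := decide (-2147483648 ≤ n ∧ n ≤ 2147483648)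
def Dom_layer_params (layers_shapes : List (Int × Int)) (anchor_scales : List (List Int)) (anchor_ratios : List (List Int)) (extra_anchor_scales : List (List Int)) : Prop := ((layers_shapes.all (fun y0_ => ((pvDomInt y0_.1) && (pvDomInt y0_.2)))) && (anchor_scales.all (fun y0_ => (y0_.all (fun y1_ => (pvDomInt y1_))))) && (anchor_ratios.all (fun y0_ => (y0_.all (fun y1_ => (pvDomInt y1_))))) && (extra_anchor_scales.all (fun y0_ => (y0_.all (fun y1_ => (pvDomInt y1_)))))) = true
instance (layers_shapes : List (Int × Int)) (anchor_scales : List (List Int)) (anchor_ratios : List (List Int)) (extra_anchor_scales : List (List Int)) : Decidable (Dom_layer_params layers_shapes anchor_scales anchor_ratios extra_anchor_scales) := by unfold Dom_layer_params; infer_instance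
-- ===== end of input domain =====

-- B replaces A's indexed loop with mutable accumulators by an index-free structural recursion
-- consuming the heads of all four lists in parallel (objective: alternative decomposition).

-- ===== PORT A =====
-- A's single loop over enumerate(layers_shapes), carrying (anchor_num, feature_num, feature_depth);
-- anchor_scales[id] etc. are in range under Pre_, so getElem?.getD [] is exact there.
def layer_params (layers_shapes : List (Int × Int)) (anchor_scales : List (List Int)) (anchor_ratios : List (List Int)) (extra_anchor_scales : List (List Int)) : Int × List Int × List Int :=
  ((List.range layers_shapes.length).zip layers_shapes).foldl
    (fun st p =>
      let id := p.1
      let layer := p.2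
      let fn : Int := layer.1 * layer.2
      let fd : Int := ((anchor_scales[id]?.getD []).length : Int) * ((anchor_ratios[id]?.getD []).length : Int)
                      + ((extra_anchor_scales[id]?.getD []).length : Int)
      (st.1 + fn * fd, st.2.1 ++ [fn], st.2.2 ++ [fd]))
    (0, [], [])

-- ===== PORT B =====
-- Source B's recursion: empty layers → (0,[],[]); otherwise take all four heads, recurse on the
-- four tails, and cons the per-layer results on. Under Pre_ the three anchor lists are
-- nonempty whenever layers_shapes is (Python would raise IndexError otherwise, excluded by Pre_).
def layer_params_alt (layers_shapes : List (Int × Int)) (anchor_scales : List (List Int)) (anchor_ratios : List (List Int)) (extra_anchor_scales : List (List Int)) : Int × List Int × List Int :=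
  match layers_shapes, anchor_scales, anchor_ratios, extra_anchor_scales with
  | [], _, _, _ => (0, [], [])
  | (h, w) :: lt, s :: st, r :: rt, e :: et =>
      let fd : Int := (s.length : Int) * (r.length : Int) + (e.length : Int)
      let rest := layer_params_alt lt st rt et
      let fn : Int := h * w
      (fn * fd + rest.1, fn :: rest.2.1, fd :: rest.2.2)
  | _, _, _, _ => (0, [], [])  -- unreachable under Pre_ (Python raises IndexError here)

-- ===== PRECONDITION & SPEC =====
-- Pre_ excludes exactly the inputs on which A raises IndexError: the three per-layer lists must
-- cover every index of layers_shapes.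
def Pre_layer_params (layers_shapes : List (Int × Int)) (anchor_scales : List (List Int)) (anchor_ratios : List (List Int)) (extra_anchor_scales : List (List Int)) : Prop :=
  layers_shapes.length ≤ anchor_scales.length ∧ layers_shapes.length ≤ anchor_ratios.length ∧ layers_shapes.length ≤ extra_anchor_scales.length
instance (layers_shapes : List (Int × Int)) (anchor_scales : List (List Int)) (anchor_ratios : List (List Int)) (extra_anchor_scales : List (List Int)) : Decidable (Pre_layer_params layers_shapes anchor_scales anchor_ratios extra_anchor_scales) := by unfold Pre_layer_params; infer_instance
def pvWitness_layer_params : (List (Int × Int)) × List (List Int) × List (List Int) × List (List Int) := ([(2,3),(1,4)], [[1],[1,2]], [[1,2],[1]], [[5],[]])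
def Spec_layer_params (layers_shapes : List (Int × Int)) (anchor_scales : List (List Int)) (anchor_ratios : List (List Int)) (extra_anchor_scales : List (List Int)) (out : Int × List Int × List Int) : Prop := out = layer_params_alt layers_shapes anchor_scales anchor_ratios extra_anchor_scales
instance (layers_shapes : List (Int × Int)) (anchor_scales : List (List Int)) (anchor_ratios : List (List Int)) (extra_anchor_scales : List (List Int)) (out : Int × List Int × List Int) : Decidable (Spec_layer_params layers_shapes anchor_scales anchor_ratios extra_anchor_scales out) := by unfold Spec_layer_params; infer_instance

-- ===== CLAIM (what is proved, stated in full; the proofs are below) =====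
def Claim_equal_layer_params : Prop := ∀ (layers_shapes : List (Int × Int)) (anchor_scales : List (List Int)) (anchor_ratios : List (List Int)) (extra_anchor_scales : List (List Int)), Dom_layer_params layers_shapes anchor_scales anchor_ratios extra_anchor_scales → Pre_layer_params layers_shapes anchor_scales anchor_ratios extra_anchor_scales → Spec_layer_params layers_shapes anchor_scales anchor_ratios extra_anchor_scales (layer_params layers_shapes anchor_scales anchor_ratios extra_anchor_scales)

-- ===== LEMMAS AND PROOFS =====

-- Invariant for A's fold, with the index window shifted by k and an arbitrary starting state.
theorem layer_params_go (anchor_scales anchor_ratios extra_anchor_scales : List (List Int))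
    (ls : List (Int × Int)) (k : Nat) (an : Int) (fns fds : List Int) :
    (((List.range ls.length).map (· + k)).zip ls).foldl
      (fun st p =>
        let id := p.1
        let layer := p.2
        let fn : Int := layer.1 * layer.2
        let fd : Int := ((anchor_scales[id]?.getD []).length : Int) * ((anchor_ratios[id]?.getD []).length : Int)
                        + ((extra_anchor_scales[id]?.getD []).length : Int)
        (st.1 + fn * fd, st.2.1 ++ [fn], st.2.2 ++ [fd]))
      (an, fns, fds)
    = (an + (((ls.map (fun p => p.1 * p.2)).zip
          ((List.range ls.length).map (fun i =>
            ((anchor_scales[i + k]?.getD []).length : Int) * ((anchor_ratios[i + k]?.getD []).length : Int)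
            + ((extra_anchor_scales[i + k]?.getD []).length : Int)))).map (fun q => q.1 * q.2)).sum,
       fns ++ ls.map (fun p => p.1 * p.2),
       fds ++ (List.range ls.length).map (fun i =>
            ((anchor_scales[i + k]?.getD []).length : Int) * ((anchor_ratios[i + k]?.getD []).length : Int)
            + ((extra_anchor_scales[i + k]?.getD []).length : Int))) := by
  induction ls generalizing k an fns fds with
  | nil => simp
  | cons hd tl ih =>
    simp only [List.length_cons, List.range_succ_eq_map, List.map_cons, List.map_map,
      List.zip_cons_cons, List.foldl_cons, List.map_cons, List.sum_cons]
    rw [show ((fun x => x + k) ∘ (fun x => x + 1) : Nat → Nat) = (· + (k+1)) by funext x; simp; omega]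
    rw [ih (k+1)]
    simp only [Prod.mk.injEq]
    refine ⟨?_, ?_, ?_⟩
    · ring_nf
      congr 3
      congr 1
      simp only [List.map_inj_left, Function.comp_apply, Nat.succ_eq_add_one]
      intro a _
      have h : 1 + k + a = k + (a + 1) := by omega
      rw [h]
    · simp
    · simp only [List.cons_append, List.append_assoc, List.append_cancel_left_eq, List.cons.injEq, true_and, List.nil_append,
        List.map_inj_left, Function.comp_apply, Nat.succ_eq_add_one]
      intro a _
      have h : a + (k + 1) = a + 1 + k := by omega
      rw [h]

-- Closed form for B's recursion, under the Pre_ length conditions.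
theorem layer_params_alt_closed (ls : List (Int × Int)) (as' ar es : List (List Int))
    (h1 : ls.length ≤ as'.length) (h2 : ls.length ≤ ar.length) (h3 : ls.length ≤ es.length) :
    layer_params_alt ls as' ar es
    = ((((ls.map (fun p => p.1 * p.2)).zip
          ((List.range ls.length).map (fun i =>
            ((as'[i]?.getD []).length : Int) * ((ar[i]?.getD []).length : Int)
            + ((es[i]?.getD []).length : Int)))).map (fun q => q.1 * q.2)).sum,
       ls.map (fun p => p.1 * p.2),
       (List.range ls.length).map (fun i =>
            ((as'[i]?.getD []).length : Int) * ((ar[i]?.getD []).length : Int)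
            + ((es[i]?.getD []).length : Int))) := by
  induction ls generalizing as' ar es with
  | nil => simp [layer_params_alt]
  | cons hd tl ih =>
    obtain ⟨s, st, rfl⟩ : ∃ s st, as' = s :: st := by
      cases as' with
      | nil => simp at h1
      | cons a b => exact ⟨a, b, rfl⟩
    obtain ⟨r, rt, rfl⟩ : ∃ r rt, ar = r :: rt := by
      cases ar with
      | nil => simp at h2
      | cons a b => exact ⟨a, b, rfl⟩
    obtain ⟨e, et, rfl⟩ : ∃ e et, es = e :: et := by
      cases es with
      | nil => simp at h3
      | cons a b => exact ⟨a, b, rfl⟩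
    simp only [List.length_cons, Nat.add_le_add_iff_right] at h1 h2 h3
    obtain ⟨h, w⟩ := hd
    simp only [layer_params_alt, ih st rt et h1 h2 h3,
      List.length_cons, List.range_succ_eq_map, List.map_cons, List.map_map,
      List.zip_cons_cons, List.sum_cons, Function.comp_def,
      List.getElem?_cons_succ, List.getElem?_cons_zero, Option.getD_some]

-- ===== VERDICT (by name: the statement is the Claim_ definition above) =====
theorem layer_params_spec : Claim_equal_layer_params := by
  intro ls as' ar es _ hpre
  obtain ⟨h1, h2, h3⟩ := hpre
  unfold Spec_layer_params layer_params
  rw [layer_params_alt_closed ls as' ar es h1 h2 h3]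
  have h := layer_params_go as' ar es ls 0 0 [] []
  simpa using h
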